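-- pv_equiv track=rewrite | github.com/mourad-ghafiri/TwoEyesModelNeuralNetwork | main.py | generate_dataset
-- ===== SOURCE A (Python) =====
-- def generate_dataset(text, context_size):
--     X = []
--     Y = []
--     for i in range(len(text)):
--         if i < context_size:
--             X.append(text[:i])
--         else:
--             X.append(text[i-context_size:i])
--         Y.append(text[i])
--     return X, Y
-- ===== SOURCE B (Python) =====
-- def generate_dataset(text, context_size):
--     X = []
--     Y = []
--     window = ""
--     for ch in text:
--         X.append(window)
--         Y.append(ch)
--         window = (window + ch)[max(0, len(window) + 1 - context_size):]
--     return X, Y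
-- ===== Notes on version B (the rewrite author's own statement) =====
-- stated objective: simpler
-- what changed: B replaces A's per-index re-slicing with its if/else branch by a single pass that carries a running window string, appending each char and trimming the front, so no index arithmetic or branch is needed.
import Mathlib
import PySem

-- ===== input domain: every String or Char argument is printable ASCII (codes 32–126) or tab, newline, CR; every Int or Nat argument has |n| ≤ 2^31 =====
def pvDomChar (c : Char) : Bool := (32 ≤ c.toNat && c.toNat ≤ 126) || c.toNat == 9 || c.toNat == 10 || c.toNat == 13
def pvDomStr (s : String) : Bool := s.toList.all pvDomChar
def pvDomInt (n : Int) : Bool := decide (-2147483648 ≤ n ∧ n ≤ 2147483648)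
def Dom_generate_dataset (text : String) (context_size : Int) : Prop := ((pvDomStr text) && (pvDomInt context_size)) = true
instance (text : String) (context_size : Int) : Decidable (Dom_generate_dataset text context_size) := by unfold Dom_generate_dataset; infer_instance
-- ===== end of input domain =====

-- B replaces A's per-index re-slicing (with its if/else) by a single running window
-- carried across one pass and trimmed in place (objective: simpler decomposition).

-- ===== PORT A =====
-- text[i] as a (length-1) Python string; i is always in range where A uses it
def gdCharStr (text : String) (i : Int) : String :=
  match PySem.Str.pyGet? text i with
  | some c => String.ofList [c]
  | none => ""

-- A: for i in range(len(text)): X.append(text[:i] if i < cs else text[i-cs:i]); Y.append(text[i])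
def generate_dataset (text : String) (context_size : Int) : List String × List String :=
  (PySem.List.pyRange 0 (PySem.Str.len text) 1).foldl
    (fun (acc : List String × List String) i =>
      (acc.1 ++ [if i < context_size then PySem.Str.slice text none (some i)
                 else PySem.Str.slice text (some (i - context_size)) (some i)],
       acc.2 ++ [gdCharStr text i]))
    ([], [])

-- ===== PORT B =====
-- B's loop body: append window to X, ch to Y, then window = (window+ch)[max(0, len(window)+1-cs):]
def gdStep (context_size : Int) (acc : List String × List String × List Char) (ch : Char) :
    List String × List String × List Char :=
  (acc.1 ++ [String.ofList acc.2.2],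
   acc.2.1 ++ [String.ofList [ch]],
   PySem.List.slice (acc.2.2 ++ [ch])
     (some (max 0 ((acc.2.2.length : Int) + 1 - context_size))) none)

def generate_dataset_alt (text : String) (context_size : Int) : List String × List String :=
  let r := text.toList.foldl (gdStep context_size) ([], [], [])
  (r.1, r.2.1)

-- ===== PRECONDITION & SPEC =====
def Spec_generate_dataset (text : String) (context_size : Int) (out : List String × List String) : Prop := out = generate_dataset_alt text context_size
instance (text : String) (context_size : Int) (out : List String × List String) : Decidable (Spec_generate_dataset text context_size out) := by unfold Spec_generate_dataset; infer_instance

-- ===== CLAIM (what is proved, stated in full; the proofs are below) =====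
def Claim_equal_generate_dataset : Prop := ∀ (text : String) (context_size : Int), Dom_generate_dataset text context_size → Spec_generate_dataset text context_size (generate_dataset text context_size)

-- ===== LEMMAS AND PROOFS =====

-- the window before processing index k: text[max(0, k-cs):k], as a list of chars
def pvW (l : List Char) (cs : Int) (k : Nat) : List Char :=
  (l.take k).drop ((k : Int) - cs).toNat

lemma pvW_length (l : List Char) (cs : Int) (k : Nat) (hk : k ≤ l.length) :
    (pvW l cs k).length = k - ((k : Int) - cs).toNat := by
  simp [pvW]; omega

lemma pvW_win_step (l : List Char) (cs : Int) (k : Nat) (hk : k < l.length) :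
    PySem.List.slice (pvW l cs k ++ [l[k]])
      (some (max 0 (((pvW l cs k).length : Int) + 1 - cs))) none = pvW l cs (k + 1) := by
  have hmax : (0 : Int) ≤ max 0 (((pvW l cs k).length : Int) + 1 - cs) := le_max_left _ _
  rw [PySem.List.slice_from _ hmax]
  have hlen := pvW_length l cs k (le_of_lt hk)
  set m := ((k : Int) - cs).toNat with hm
  set t := (((k : Nat) + 1 : Int) - cs).toNat with ht
  have htk : l.take (k + 1) = l.take k ++ [l[k]] := List.take_succ_eq_append_getElem hk
  by_cases hmk : m ≤ k
  · have hs : (max 0 (((pvW l cs k).length : Int) + 1 - cs)).toNat = t - m := by omega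
    rw [hs]
    show ((l.take k).drop m ++ [l[k]]).drop (t - m) = (l.take (k+1)).drop t
    rw [← List.drop_append_of_le_length (by simp; omega), List.drop_drop, htk]
    congr 1
    omega
  · -- cs < 0: the window is empty and stays empty
    have h1 : pvW l cs k = [] := List.drop_eq_nil_of_le (by simp; omega)
    have h2 : pvW l cs (k+1) = [] := List.drop_eq_nil_of_le (by simp; omega)
    rw [h1, h2]
    apply List.drop_eq_nil_of_le
    simp
    omega

lemma B_loop (cs : Int) (l : List Char) :
    ∀ (n k : Nat) (X Y : List String), k + n = l.length →
    (l.drop k).foldl (gdStep cs) (X, Y, pvW l cs k) =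
      (X ++ (List.range' k n).map (fun i => String.ofList (pvW l cs i)),
       Y ++ (l.drop k).map (fun c => String.ofList [c]),
       pvW l cs l.length) := by
  intro n
  induction n with
  | zero =>
    intro k X Y h
    have hd : l.drop k = [] := List.drop_eq_nil_of_le (by omega)
    have hkl : k = l.length := by omega
    simp [hkl]
  | succ n ih =>
    intro k X Y h
    have hk : k < l.length := by omega
    rw [List.drop_eq_getElem_cons hk, List.foldl_cons]
    have hstep : gdStep cs (X, Y, pvW l cs k) l[k] =
        (X ++ [String.ofList (pvW l cs k)], Y ++ [String.ofList [l[k]]], pvW l cs (k+1)) := by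
      simp [gdStep, pvW_win_step l cs k hk]
    rw [hstep, ih (k+1) _ _ (by omega), List.range'_succ]
    simp only [List.map_cons, List.append_assoc, Prod.mk.injEq, and_true]
    constructor
    · simp
    · simp

lemma B_eq (text : String) (cs : Int) :
    generate_dataset_alt text cs =
      ((List.range text.toList.length).map (fun k => String.ofList (pvW text.toList cs k)),
       text.toList.map (fun c => String.ofList [c])) := by
  unfold generate_dataset_alt
  have h0 : pvW text.toList cs 0 = [] := by simp [pvW]
  have h := B_loop cs text.toList text.toList.length 0 [] [] (by omega)
  rw [List.drop_zero, h0] at h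
  rw [h]
  simp [List.range_eq_range']

lemma A_eq (text : String) (cs : Int) :
    generate_dataset text cs =
      ((List.range text.toList.length).map (fun k => String.ofList (pvW text.toList cs k)),
       text.toList.map (fun c => String.ofList [c])) := by
  unfold generate_dataset
  rw [PySem.List.pyRange_one]
  have hn : ((PySem.Str.len text - 0)).toNat = text.toList.length := by
    simp [PySem.Str.len_eq]
  rw [hn, List.foldl_map]
  simp only [zero_add]
  rw [PySem.List.foldl_prod_mk
    (fun (a : List String) (i : Nat) =>
      a ++ [if (i : Int) < cs then PySem.Str.slice text none (some (i : Int))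
            else PySem.Str.slice text (some ((i : Int) - cs)) (some (i : Int))])
    (fun (b : List String) (i : Nat) => b ++ [gdCharStr text (i : Int)])]
  simp only [Prod.mk.injEq]
  constructor
  · rw [PySem.List.foldl_append_singleton_eq_map]
    simp only [List.nil_append]
    apply List.map_congr_left
    intro k hk
    rw [List.mem_range] at hk
    -- show A's k-th slice equals the window pvW
    have hget : ∀ s : String, s = String.ofList s.toList :=
      fun _ => Eq.symm String.ofList_toList
    by_cases hcs : ((k : Int)) < cs
    · rw [if_pos hcs, hget (PySem.Str.slice text none (some ((k:Int))))]
      congr 1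
      rw [PySem.Str.toList_slice]
      simp only [PySem.Chars.slice_eq_listSlice]
      rw [PySem.List.slice_to_natCast]
      have : ((k : Int) - cs).toNat = 0 := by omega
      simp [pvW, this]
    · rw [if_neg hcs, hget (PySem.Str.slice text (some ((k:Int) - cs)) (some ((k:Int))))]
      congr 1
      rw [PySem.Str.toList_slice]
      simp only [PySem.Chars.slice_eq_listSlice]
      rw [PySem.List.slice_toNat _ (by omega) (by omega)]
      simp only [Int.toNat_natCast]
      rw [List.take_drop]
      set m := ((k : Int) - cs).toNat with hm
      by_cases hmk : m ≤ k
      · have : m + (k - m) = k := by omega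
        rw [this]; rfl
      · have h1 : (List.take (m + (k - m)) text.toList).drop m = [] :=
          List.drop_eq_nil_of_le (by simp; omega)
        have h2 : pvW text.toList cs k = [] := List.drop_eq_nil_of_le (by simp; omega)
        rw [h1, h2]
  · rw [PySem.List.foldl_append_singleton_eq_map]
    simp only [List.nil_append]
    apply List.ext_getElem (by simp)
    intro i h1 h2
    simp only [List.getElem_map, List.getElem_range]
    unfold gdCharStr
    rw [PySem.Str.pyGet?_natCast]
    simp at h2
    rw [List.getElem?_eq_getElem h2]
    rfl

-- ===== VERDICT (by name: the statement is the Claim_ definition above) =====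
theorem generate_dataset_spec : Claim_equal_generate_dataset := by
  intro text cs _
  unfold Spec_generate_dataset
  rw [A_eq, B_eq]
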